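-- pv_equiv track=rewrite | github.com/sadoway7/rumfor-popcan | tools/ralph_loop_monitor.py | extract_remaining_work
-- ===== SOURCE A (Python) =====
-- def extract_remaining_work(continuation_content: str) -> list:
--     """Extract remaining work items from continuation marker."""
--     # Parse the continuation content to extract remaining work
--     remaining = []
--
--     # Look for patterns like "Remaining:" or "Next focus:"
--     lines = continuation_content.split('\n')
--     in_remaining = False
--
--     for line in lines:
--         line = line.strip()
--         if line.lower().startswith(('remaining:', 'next focus:', 'remaining work:')):
--             in_remaining = True
--             # Extract items after the label
--             items_part = line.split(':', 1)[1].strip() if ':' in line else line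
--             remaining.extend([item.strip('- •').strip() for item in items_part.split(',') if item.strip()])
--         elif in_remaining and line and not line.startswith('RALPH_'):
--             # Continue collecting items until next marker
--             remaining.extend([item.strip('- •').strip() for item in line.split(',') if item.strip()])
--         elif line.startswith('RALPH_'):
--             # Hit another marker, stop
--             break
--
--     return [item for item in remaining if item]  # Filter out empty items
-- ===== SOURCE B (Python) =====
-- MARKERS = ('remaining:', 'next focus:', 'remaining work:')
--
--
-- def _is_marker(line):
--     return line.lower().startswith(MARKERS)
--
--
-- def _parse_line(line):
--     """Items of one segment line: marker lines use the text after the first ':'."""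
--     text = line.split(':', 1)[1].strip() if _is_marker(line) else line
--     return [item.strip('- •').strip() for item in text.split(',') if item.strip()]
--
--
-- def extract_remaining_work(continuation_content: str) -> list:
--     """Extract remaining work items from continuation marker."""
--     lines = [l.strip() for l in continuation_content.split('\n')]
--     # segment of interest: everything before the first RALPH_ marker line
--     seg = []
--     for l in lines:
--         if l.startswith('RALPH_'):
--             break
--         seg.append(l)
--     # drop everything before the first label line ("Remaining:" / "Next focus:" / ...)
--     while seg and not _is_marker(seg[0]):
--         seg.pop(0)
--     return [it for l in seg for it in _parse_line(l) if it]
-- ===== Notes on version B (the rewrite author's own statement) =====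
-- stated objective: alternative
-- what changed: Replaces A's single-pass state machine with an in_remaining flag and break by a slice-then-parse pipeline: take stripped lines before the first RALPH_ line, drop lines before the first marker label, then flat-map every remaining line through one shared line parser.
import Mathlib
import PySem

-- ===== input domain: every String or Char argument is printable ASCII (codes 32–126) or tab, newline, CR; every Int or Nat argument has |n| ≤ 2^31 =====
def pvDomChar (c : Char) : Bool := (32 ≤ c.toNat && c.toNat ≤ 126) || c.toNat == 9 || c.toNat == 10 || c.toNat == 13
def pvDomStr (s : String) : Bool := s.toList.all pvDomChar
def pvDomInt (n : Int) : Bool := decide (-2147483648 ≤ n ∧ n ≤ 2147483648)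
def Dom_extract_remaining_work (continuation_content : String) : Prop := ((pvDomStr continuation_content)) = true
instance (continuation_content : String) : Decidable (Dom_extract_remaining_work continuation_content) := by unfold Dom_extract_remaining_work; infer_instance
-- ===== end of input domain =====

-- B replaces A's flag-driven state machine by a slice-then-parse pipeline
-- (take lines before the first RALPH_ line, drop lines before the first label
-- line, flat-map a line parser); alternative decomposition, same cost.


-- ===== PORT A =====
-- s.split(sep) for a nonempty separator (thin wrapper over PySem.Chars.splitOn)
def pvSplit (s sep : String) : List String :=
  (PySem.Chars.splitOn s.toList sep.toList).map String.ofList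

-- line.lower().startswith(('remaining:', 'next focus:', 'remaining work:'))
def pvIsMarkerA (line : String) : Bool :=
  PySem.Str.startswith (PySem.Str.lower line) "remaining:" ||
  PySem.Str.startswith (PySem.Str.lower line) "next focus:" ||
  PySem.Str.startswith (PySem.Str.lower line) "remaining work:"

-- line.split(':', 1)[1]  (only called when ':' in line, so two pieces exist)
def pvAfterColonA (line : String) : String :=
  match PySem.Str.splitMax? line ":" 1 with
  | some (_ :: p :: _) => p
  | _ => line

-- [item.strip('- •').strip() for item in s.split(',') if item.strip()]
def pvItemsA (s : String) : List String :=
  ((pvSplit s ",").filter (fun item => PySem.Str.strip item ≠ "")).map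
    (fun item => PySem.Str.strip (PySem.Str.stripChars item "- •"))

-- the for-loop with its in_remaining flag, accumulator and break
def pvLoopA : List String → Bool → List String → List String
  | [], _, remaining => remaining
  | l :: ls, in_remaining, remaining =>
    let line := PySem.Str.strip l
    if pvIsMarkerA line then
      let items_part :=
        if PySem.Str.isIn ":" line then PySem.Str.strip (pvAfterColonA line) else line
      pvLoopA ls true (remaining ++ pvItemsA items_part)
    else if in_remaining && line ≠ "" && !PySem.Str.startswith line "RALPH_" then
      pvLoopA ls in_remaining (remaining ++ pvItemsA line)
    else if PySem.Str.startswith line "RALPH_" then remaining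
    else pvLoopA ls in_remaining remaining

def extract_remaining_work (continuation_content : String) : List String :=
  (pvLoopA (pvSplit continuation_content "\n") false []).filter
    (fun item => item ≠ "")

-- ===== PORT B =====
def pvIsMarkerB (line : String) : Bool :=
  PySem.Str.startswith (PySem.Str.lower line) "remaining:" ||
  PySem.Str.startswith (PySem.Str.lower line) "next focus:" ||
  PySem.Str.startswith (PySem.Str.lower line) "remaining work:"

-- _parse_line
def pvParseLineB (line : String) : List String :=
  let text :=
    if pvIsMarkerB line then
      PySem.Str.strip (match PySem.Str.splitMax? line ":" 1 with
                       | some (_ :: p :: _) => p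
                       | _ => line)
    else line
  ((pvSplit text ",").filter (fun item => PySem.Str.strip item ≠ "")).map
    (fun item => PySem.Str.strip (PySem.Str.stripChars item "- •"))

def extract_remaining_work_alt (continuation_content : String) : List String :=
  let lines : List String := (pvSplit continuation_content "\n").map PySem.Str.strip
  let seg : List String := lines.takeWhile (fun l => !PySem.Str.startswith l "RALPH_")
  let seg2 : List String := seg.dropWhile (fun l => !pvIsMarkerB l)
  (seg2.flatMap pvParseLineB).filter (fun it => it ≠ "")

-- ===== PRECONDITION & SPEC =====
def Spec_extract_remaining_work (continuation_content : String) (out : List String) : Prop := out = extract_remaining_work_alt continuation_content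
instance (continuation_content : String) (out : List String) : Decidable (Spec_extract_remaining_work continuation_content out) := by unfold Spec_extract_remaining_work; infer_instance

-- ===== CLAIM (what is proved, stated in full; the proofs are below) =====
def Claim_equal_extract_remaining_work : Prop := ∀ (continuation_content : String), Dom_extract_remaining_work continuation_content → Spec_extract_remaining_work continuation_content (extract_remaining_work continuation_content)

-- ===== LEMMAS AND PROOFS =====

-- a prefix determines the first elements
theorem pv_prefix_getElem? {p l : List Char} (h : p <+: l) (i : Nat) (hi : i < p.length) :
    l[i]? = p[i]? := by
  obtain ⟨t, rfl⟩ := h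
  rw [List.getElem?_append_left hi]

-- every marker prefix has 'e' at index 1 and ':' at a known index
theorem pv_marker_lower_getElem (line : String) (h : pvIsMarkerA line = true) :
    ∃ k : Nat, (PySem.Chars.lower line.toList)[(1:Nat)]? = some 'e' ∧
         (PySem.Chars.lower line.toList)[k]? = some ':' := by
  simp only [pvIsMarkerA, Bool.or_eq_true, PySem.Str.startswith_eq, PySem.Str.toList_lower,
    PySem.Chars.startswith_iff] at h
  rcases h with (h | h) | h
  · exact ⟨9, pv_prefix_getElem? h 1 (by decide), by rw [pv_prefix_getElem? h 9 (by decide)]; decide⟩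
  · exact ⟨10, pv_prefix_getElem? h 1 (by decide), by rw [pv_prefix_getElem? h 10 (by decide)]; decide⟩
  · exact ⟨14, pv_prefix_getElem? h 1 (by decide), by rw [pv_prefix_getElem? h 14 (by decide)]; decide⟩

-- only ':' lowercases to ':'
theorem pv_lowerChar_eq_colon {c : Char} (h : PySem.Chars.lowerChar c = ':') : c = ':' := by
  simp only [PySem.Chars.lowerChar, PySem.Chars.isupper] at h
  split_ifs at h with h1
  · exfalso
    simp only [Bool.and_eq_true, decide_eq_true_eq, Char.le_def, UInt32.le_iff_toNat_le] at h1
    have hlo : 65 ≤ c.toNat := h1.1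
    have hhi : c.toNat ≤ 90 := h1.2
    have h2 := congrArg Char.toNat h
    rw [Char.toNat_ofNat, if_pos (by left; omega)] at h2
    have : (':' : Char).toNat = 58 := by decide
    omega
  · exact h

-- a marker line cannot start with 'RALPH_'
theorem pv_marker_not_ralph (line : String) (h : pvIsMarkerA line = true) :
    PySem.Str.startswith line "RALPH_" = false := by
  obtain ⟨k, he, _⟩ := pv_marker_lower_getElem line h
  rw [Bool.eq_false_iff]
  intro hr
  rw [PySem.Str.startswith_eq, PySem.Chars.startswith_iff] at hr
  have h1 : line.toList[(1:Nat)]? = some 'A' := by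
    rw [pv_prefix_getElem? hr 1 (by decide)]; rfl
  have h2 : (PySem.Chars.lower line.toList)[(1:Nat)]? = some 'a' := by
    show (List.map PySem.Chars.lowerChar line.toList)[(1:Nat)]? = some 'a'
    rw [List.getElem?_map, h1]; rfl
  rw [h2] at he
  simp at he

-- a marker line contains ':'
theorem pv_marker_isIn_colon (line : String) (h : pvIsMarkerA line = true) :
    PySem.Str.isIn ":" line = true := by
  obtain ⟨k, _, hc⟩ := pv_marker_lower_getElem line h
  have hc' : (List.map PySem.Chars.lowerChar line.toList)[k]? = some ':' := hc
  rw [List.getElem?_map] at hc'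
  obtain ⟨c, hck, hlc⟩ := Option.map_eq_some_iff.mp hc'
  have hcc : c = ':' := pv_lowerChar_eq_colon hlc
  subst hcc
  have hmem : ':' ∈ line.toList := List.mem_of_getElem? hck
  rw [PySem.Str.isIn_iff_infix]
  show [':'] <:+: line.toList
  exact (List.singleton_infix_iff ':' line.toList).mpr hmem

-- the two marker tests are the same function
theorem pv_markerB_eq_A (line : String) : pvIsMarkerB line = pvIsMarkerA line := rfl

-- the marker-branch expression of A equals B's line parser on a marker line
theorem pv_itemsA_eq_parseB_marker (line : String) (h : pvIsMarkerA line = true) :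
    pvItemsA (if PySem.Str.isIn ":" line then PySem.Str.strip (pvAfterColonA line) else line)
      = pvParseLineB line := by
  rw [pv_marker_isIn_colon line h, if_pos rfl]
  simp only [pvParseLineB, pvItemsA, pvAfterColonA, pv_markerB_eq_A, h, if_pos]

-- on a non-marker line A's item expression is B's line parser
theorem pv_itemsA_eq_parseB_plain (line : String) (h : pvIsMarkerA line = false) :
    pvItemsA line = pvParseLineB line := by
  simp only [pvParseLineB, pvItemsA, pv_markerB_eq_A, h, Bool.false_eq_true, if_false]
theorem pv_parseB_empty : pvParseLineB "" = [] := by decide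

theorem pv_loopA_true (ls : List String) (acc : List String) :
    pvLoopA ls true acc =
      acc ++ ((ls.map PySem.Str.strip).takeWhile
                (fun l => !PySem.Str.startswith l "RALPH_")).flatMap pvParseLineB := by
  induction ls generalizing acc with
  | nil => simp [pvLoopA]
  | cons l ls ih =>
    rw [List.map_cons, List.takeWhile_cons]
    by_cases hm : pvIsMarkerA (PySem.Str.strip l) = true
    · have hr := pv_marker_not_ralph _ hm
      rw [hr]
      simp only [Bool.not_false, if_true, List.flatMap_cons]
      rw [← pv_itemsA_eq_parseB_marker _ hm]
      simp only [pvLoopA, hm, if_pos]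
      rw [ih, List.append_assoc]
    · by_cases hr : PySem.Str.startswith (PySem.Str.strip l) "RALPH_" = true
      · rw [hr]
        simp only [Bool.not_true]
        simp only [pvLoopA, hm, hr]
        simp
      · have hm' : pvIsMarkerA (PySem.Str.strip l) = false := by simpa using hm
        have hr' : PySem.Str.startswith (PySem.Str.strip l) "RALPH_" = false := by simpa using hr
        rw [hr']
        simp only [Bool.not_false, if_true, List.flatMap_cons]
        by_cases he : PySem.Str.strip l = ""
        · have step : pvLoopA (l :: ls) true acc = pvLoopA ls true acc := by
            have h0 : pvIsMarkerA "" = false := by decide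
            have h1 : PySem.Chars.startswith ([] : List Char) ['R', 'A', 'L', 'P', 'H', '_'] = false := by decide
            simp only [pvLoopA, he, h0]
            simp [h1]
          rw [step, ih, he, pv_parseB_empty, List.nil_append]
        · have step : pvLoopA (l :: ls) true acc
              = pvLoopA ls true (acc ++ pvItemsA (PySem.Str.strip l)) := by
            simp only [pvLoopA, hm', hr']
            simp [he]
          rw [step, ih, pv_itemsA_eq_parseB_plain _ hm', List.append_assoc]

theorem pv_loopA_false (ls : List String) (acc : List String) :
    pvLoopA ls false acc =
      acc ++ (((ls.map PySem.Str.strip).takeWhile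
                 (fun l => !PySem.Str.startswith l "RALPH_")).dropWhile
                 (fun l => !pvIsMarkerB l)).flatMap pvParseLineB := by
  induction ls generalizing acc with
  | nil => simp [pvLoopA]
  | cons l ls ih =>
    rw [List.map_cons, List.takeWhile_cons]
    by_cases hm : pvIsMarkerA (PySem.Str.strip l) = true
    · have hr := pv_marker_not_ralph _ hm
      rw [hr]
      simp only [Bool.not_false, if_true, List.dropWhile_cons, pv_markerB_eq_A, hm,
        Bool.not_true, Bool.false_eq_true, if_false, List.flatMap_cons]
      rw [← pv_itemsA_eq_parseB_marker _ hm]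
      simp only [pvLoopA, hm, if_pos]
      rw [pv_loopA_true, List.append_assoc]
    · have hm' : pvIsMarkerA (PySem.Str.strip l) = false := by simpa using hm
      by_cases hr : PySem.Str.startswith (PySem.Str.strip l) "RALPH_" = true
      · rw [hr]
        simp only [Bool.not_true]
        simp only [pvLoopA, hm', hr]
        simp
      · have hr' : PySem.Str.startswith (PySem.Str.strip l) "RALPH_" = false := by simpa using hr
        rw [hr']
        simp only [Bool.not_false, if_true, List.dropWhile_cons, pv_markerB_eq_A, hm',
          Bool.not_false, if_true]
        have step : pvLoopA (l :: ls) false acc = pvLoopA ls false acc := by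
          simp only [pvLoopA, hm', hr']
          simp
        rw [step, ih]
        simp only [pv_markerB_eq_A]

-- ===== VERDICT (by name: the statement is the Claim_ definition above) =====
theorem extract_remaining_work_spec : Claim_equal_extract_remaining_work := by
  intro c _
  unfold Spec_extract_remaining_work extract_remaining_work extract_remaining_work_alt
  rw [pv_loopA_false]
  rfl
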